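-- pv_equiv track=rewrite | github.com/Fenov42/ZOV-GOIDA | нови.py | eval_qap_at_s
-- ===== SOURCE A (Python) =====
-- MOD = 21888242871839275222246405745257275088548364400416034343698204186575808495617
--
-- def modinv(a, m=MOD):
--     return pow(a, m-2, m)
--
-- def lagrange_eval_at_s(i: int, m: int, s_val: int):
--     ti = i+1
--     num = 1
--     den = 1
--     for j in range(1, m+1):
--         if j == ti: continue
--         num = (num * (s_val - j)) % MOD
--         den = (den * (ti - j)) % MOD
--     return (num * modinv(den)) % MOD
--
-- def eval_qap_at_s(A, B, C, witness, s_val):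
--     m = len(A)
--     nvars = len(A[0])
--     def build_poly_eval(M):
--         vals = [0]*m
--         for i in range(m):
--             Li = lagrange_eval_at_s(i, m, s_val)
--             vals[i] = Li
--         A_k_s = [0]*nvars
--         for k in range(nvars):
--             acc = 0
--             for i in range(m):
--                 acc = (acc + (M[i][k] * vals[i])) % MOD
--             A_k_s[k] = acc
--         As = 0
--         for k in range(nvars):
--             wk = 0 if witness[k] is None else witness[k]
--             As = (As + (wk * A_k_s[k])) % MOD
--         return As
--     As = build_poly_eval(A)
--     Bs = build_poly_eval(B)
--     Cs = build_poly_eval(C)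
--     return As, Bs, Cs
-- ===== SOURCE B (Python) =====
-- MOD = 21888242871839275222246405745257275088548364400416034343698204186575808495617
--
-- def _modinv(a):
--     return pow(a, MOD - 2, MOD)
--
-- def eval_qap_at_s(A, B, C, witness, s_val):
--     m = len(A)
--     nvars = len(A[0])
--     # Lagrange basis computed ONCE (A's code recomputes it for each of A, B, C):
--     # prefix/suffix products give every numerator in O(m) total, and the
--     # denominator prod_{j!=i+1}((i+1)-j) has the closed form (-1)^(m-1-i)*i!*(m-1-i)!.
--     pre = [1] * (m + 1)            # pre[i]  = prod_{j=1..i}   (s_val-j) % MOD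
--     for i in range(1, m + 1):
--         pre[i] = pre[i - 1] * (s_val - i) % MOD
--     suf = [1] * (m + 2)            # suf[t]  = prod_{j=t..m}   (s_val-j) % MOD
--     for t in range(m, 0, -1):
--         suf[t] = suf[t + 1] * (s_val - t) % MOD
--     fact = [1] * (m + 1)           # fact[t] = t! % MOD
--     for t in range(1, m + 1):
--         fact[t] = fact[t - 1] * t % MOD
--     vals = []
--     for i in range(m):
--         num = pre[i] * suf[i + 2] % MOD
--         den = fact[i] * fact[m - 1 - i] % MOD
--         if (m - 1 - i) % 2 == 1:
--             den = -den % MOD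
--         vals.append(num * _modinv(den) % MOD)
--     # row-major accumulation: acc = sum_i basis_i * <row_i, witness>, one pass per matrix
--     def acc_rows(M):
--         acc = 0
--         for i in range(m):
--             row = M[i]
--             r = 0
--             for k in range(nvars):
--                 w = witness[k]
--                 if w is None:
--                     w = 0
--                 r = (r + row[k] * w) % MOD
--             acc = (acc + vals[i] * r) % MOD
--         return acc
--     return acc_rows(A), acc_rows(B), acc_rows(C)
-- ===== Notes on version B (the rewrite author's own statement) =====
-- stated objective: faster
-- what changed: B computes the Lagrange basis once and reuses it for A, B and C (A's code recomputes it for each matrix), replaces each O(m) numerator loop by O(m)-total prefix/suffix products and each O(m) denominator loop by the closed form (-1)^(m-1-i)*i!*(m-1-i)! from precomputed factorials, and accumulates each matrix row-major against the witness instead of building per-column sums first.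
-- outside the precondition, e.g. on eval_qap_at_s([[], []], [[]], [[]], [], 0): A returns (0, 0, 0), B raises IndexError
import Mathlib
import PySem

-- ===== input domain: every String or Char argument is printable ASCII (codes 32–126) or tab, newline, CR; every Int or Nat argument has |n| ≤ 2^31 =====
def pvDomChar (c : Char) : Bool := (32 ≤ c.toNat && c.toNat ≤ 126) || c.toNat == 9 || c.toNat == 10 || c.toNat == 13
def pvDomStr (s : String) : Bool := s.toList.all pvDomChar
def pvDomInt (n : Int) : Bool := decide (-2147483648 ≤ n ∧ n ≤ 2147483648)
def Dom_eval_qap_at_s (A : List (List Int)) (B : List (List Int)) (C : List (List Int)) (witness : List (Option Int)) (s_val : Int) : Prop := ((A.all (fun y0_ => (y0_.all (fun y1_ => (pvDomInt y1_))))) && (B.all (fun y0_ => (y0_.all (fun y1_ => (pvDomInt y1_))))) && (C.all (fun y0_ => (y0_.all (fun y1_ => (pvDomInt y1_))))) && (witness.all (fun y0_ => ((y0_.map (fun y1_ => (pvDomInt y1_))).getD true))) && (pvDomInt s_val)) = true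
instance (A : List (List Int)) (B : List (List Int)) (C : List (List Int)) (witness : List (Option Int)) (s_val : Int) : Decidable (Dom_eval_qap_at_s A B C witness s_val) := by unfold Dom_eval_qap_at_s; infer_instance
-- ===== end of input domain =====

-- B computes the shared Lagrange basis once (prefix/suffix products + factorial closed form
-- for the denominators) and folds each matrix row-major against the witness; A recomputes the
-- basis per matrix and per index with O(m) loops and goes through per-column sums.


-- ===== PORT A =====
-- MOD from the Python module
def pvM : Int := 21888242871839275222246405745257275088548364400416034343698204186575808495617
-- Python's '% MOD' (PySem.Int.mod with the positive literal divisor)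
def pvmod (a : Int) : Int := PySem.Int.mod a pvM

-- three-argument pow(b, e, m) for m > 0, by square-and-multiply (exact on every input both
-- Pythons pass: both call pow(_, MOD-2, MOD) with MOD > 0, where pow returns b^e mod m in [0, m))
def pvPowMod (b : Int) (e : Nat) (m : Int) : Int :=
  if h : e = 0 then 1 % m
  else
    let r := pvPowMod ((b * b) % m) (e / 2) m
    if e % 2 = 1 then (r * b) % m else r
decreasing_by exact Nat.div_lt_self (Nat.pos_of_ne_zero h) one_lt_two

-- modinv(a) = pow(a, MOD-2, MOD); the exponent is the Nat literal MOD - 2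
def pvModinv (a : Int) : Int :=
  pvPowMod a 21888242871839275222246405745257275088548364400416034343698204186575808495615 pvM

-- lagrange_eval_at_s: one fold carrying the (num, den) pair, skipping j == ti
def pvLagrange (i m s_val : Int) : Int :=
  let ti := i + 1
  let nd := (PySem.List.pyRange 1 (m + 1)).foldl
    (fun (p : Int × Int) j =>
      if j = ti then p
      else (pvmod (p.1 * (s_val - j)), pvmod (p.2 * (ti - j))))
    (1, 1)
  pvmod (nd.1 * pvModinv nd.2)

-- build_poly_eval(M): vals (the basis, recomputed per call), the per-column sums A_k_s, then As
def pvBuildPoly (M : List (List Int)) (witness : List (Option Int)) (s_val m nvars : Int) : Int :=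
  let vals := (PySem.List.pyRange 0 m).map (fun i => pvLagrange i m s_val)
  let aks := (PySem.List.pyRange 0 nvars).map (fun k =>
    (PySem.List.pyRange 0 m).foldl
      (fun acc i => pvmod (acc + PySem.List.pyGetD (PySem.List.pyGetD M i []) k 0
                                 * PySem.List.pyGetD vals i 0)) 0)
  (PySem.List.pyRange 0 nvars).foldl
    (fun acc k => pvmod (acc + (PySem.List.pyGetD witness k none).getD 0
                               * PySem.List.pyGetD aks k 0)) 0

def eval_qap_at_s (A : List (List Int)) (B : List (List Int)) (C : List (List Int)) (witness : List (Option Int)) (s_val : Int) : Int × Int × Int :=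
  let m : Int := A.length
  let nvars : Int := (PySem.List.pyGetD A 0 []).length
  (pvBuildPoly A witness s_val m nvars,
   pvBuildPoly B witness s_val m nvars,
   pvBuildPoly C witness s_val m nvars)

-- ===== PORT B =====
-- pre[i] = prod_{j=1..i}(s_val-j) % MOD, built left to right (pre[i-1] is the last element)
def pvPre (s_val m : Int) : List Int :=
  (PySem.List.pyRange 1 (m + 1)).foldl
    (fun acc i => acc ++ [pvmod (PySem.List.pyGetD acc (i - 1) 0 * (s_val - i))]) [1]

-- suf holds Python's suf[1..m+1] (the never-read slot 0 is dropped, so Python's suf[t] is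
-- element t-1 here); built by the downward loop, prepending suf[t] = suf[t+1]*(s_val-t) % MOD
def pvSuf (s_val m : Int) : List Int :=
  (PySem.List.pyRange m 0 (-1)).foldl
    (fun acc t => pvmod (PySem.List.pyGetD acc 0 0 * (s_val - t)) :: acc) [1]

-- fact[t] = t! % MOD
def pvFact (m : Int) : List Int :=
  (PySem.List.pyRange 1 (m + 1)).foldl
    (fun acc t => acc ++ [pvmod (PySem.List.pyGetD acc (t - 1) 0 * t)]) [1]

-- the basis list: vals.append(num * _modinv(den) % MOD) with num from pre/suf and den from fact
def pvValsB (s_val m : Int) : List Int :=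
  let pre := pvPre s_val m
  let suf := pvSuf s_val m
  let fact := pvFact m
  (PySem.List.pyRange 0 m).foldl
    (fun acc i =>
      acc ++ [pvmod
        (pvmod (PySem.List.pyGetD pre i 0 * PySem.List.pyGetD suf (i + 1) 0)
         * pvModinv
            (if PySem.Int.mod (m - 1 - i) 2 = 1
             then pvmod (-(pvmod (PySem.List.pyGetD fact i 0 * PySem.List.pyGetD fact (m - 1 - i) 0)))
             else pvmod (PySem.List.pyGetD fact i 0 * PySem.List.pyGetD fact (m - 1 - i) 0)))]) []

-- acc_rows(M): acc = sum_i vals[i] * <row_i, witness> % MOD   (w = witness[k], None -> 0)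
def pvAccRows (M : List (List Int)) (witness : List (Option Int)) (vals : List Int) (m nvars : Int) : Int :=
  (PySem.List.pyRange 0 m).foldl
    (fun acc i =>
      pvmod (acc + PySem.List.pyGetD vals i 0 *
        (PySem.List.pyRange 0 nvars).foldl
          (fun r k => pvmod (r + PySem.List.pyGetD (PySem.List.pyGetD M i []) k 0
                                 * (PySem.List.pyGetD witness k none).getD 0)) 0)) 0

def eval_qap_at_s_alt (A : List (List Int)) (B : List (List Int)) (C : List (List Int)) (witness : List (Option Int)) (s_val : Int) : Int × Int × Int :=
  let m : Int := A.length
  let nvars : Int := (PySem.List.pyGetD A 0 []).length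
  let vals := pvValsB s_val m
  (pvAccRows A witness vals m nvars,
   pvAccRows B witness vals m nvars,
   pvAccRows C witness vals m nvars)

-- ===== PRECONDITION & SPEC =====
-- the inputs on which the Python A returns and B returns too: A nonempty (A[0] is read), B and C
-- have at least len(A) rows, and witness and every row read from A, B, C have at least len(A[0])
-- entries; this also excludes the degenerate inputs with len(A[0]) == 0 but fewer than len(A) rows
-- in B or C, where A returns (0, 0, 0) without ever indexing into B or C while the natural
-- row-major B still reads M[i] and raises IndexError.
def Pre_eval_qap_at_s (A : List (List Int)) (B : List (List Int)) (C : List (List Int)) (witness : List (Option Int)) (s_val : Int) : Prop :=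
  A ≠ [] ∧ A.length ≤ B.length ∧ A.length ≤ C.length ∧
  (A.headI).length ≤ witness.length ∧
  (∀ row ∈ A, (A.headI).length ≤ row.length) ∧
  (∀ row ∈ B.take A.length, (A.headI).length ≤ row.length) ∧
  (∀ row ∈ C.take A.length, (A.headI).length ≤ row.length)
instance (A : List (List Int)) (B : List (List Int)) (C : List (List Int)) (witness : List (Option Int)) (s_val : Int) : Decidable (Pre_eval_qap_at_s A B C witness s_val) := by unfold Pre_eval_qap_at_s; infer_instance

def pvWitness_eval_qap_at_s : List (List Int) × List (List Int) × List (List Int) × List (Option Int) × Int :=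
  ([[1]], [[2]], [[3]], [some 1], 2)

def Spec_eval_qap_at_s (A : List (List Int)) (B : List (List Int)) (C : List (List Int)) (witness : List (Option Int)) (s_val : Int) (out : Int × Int × Int) : Prop := out = eval_qap_at_s_alt A B C witness s_val
instance (A : List (List Int)) (B : List (List Int)) (C : List (List Int)) (witness : List (Option Int)) (s_val : Int) (out : Int × Int × Int) : Decidable (Spec_eval_qap_at_s A B C witness s_val out) := by unfold Spec_eval_qap_at_s; infer_instance

-- ===== CLAIM (what is proved, stated in full; the proofs are below) =====
def Claim_equal_eval_qap_at_s : Prop := ∀ (A : List (List Int)) (B : List (List Int)) (C : List (List Int)) (witness : List (Option Int)) (s_val : Int), Dom_eval_qap_at_s A B C witness s_val → Pre_eval_qap_at_s A B C witness s_val → Spec_eval_qap_at_s A B C witness s_val (eval_qap_at_s A B C witness s_val)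

-- ===== LEMMAS AND PROOFS =====

theorem pvmod_eq (a : Int) : pvmod a = a % pvM := by
  unfold pvmod
  exact PySem.Int.mod_eq_emod_of_pos (by norm_num [pvM])

theorem one_emod_pvM : (1 : Int) % pvM = 1 := by norm_num [pvM]

def prodS (s a b : Int) : Int := ((PySem.List.pyRange a b).map (fun j => s - j)).prod

def vRef (s : Int) (m i : Nat) : Int :=
  ((prodS s 1 (i + 1) * prodS s (i + 2) (m + 1)) % pvM
   * pvModinv (((Nat.factorial i : Int) * ((-1) ^ (m - 1 - i) * (Nat.factorial (m - 1 - i) : Int))) % pvM)) % pvM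

theorem foldl_pvmod_add {α : Type} (g : α → Int) (l : List α) (a : Int) (ha : a % pvM = a) :
    l.foldl (fun x j => pvmod (x + g j)) a = (a + (l.map g).sum) % pvM := by
  induction l generalizing a with
  | nil => simp [ha]
  | cons h t ih =>
    simp only [List.foldl_cons, List.map_cons, List.sum_cons]
    rw [ih (pvmod (a + g h)) (by rw [pvmod_eq]; exact Int.emod_emod_of_dvd _ dvd_rfl), pvmod_eq]
    have : ((a + g h) % pvM + (t.map g).sum) % pvM = ((a + g h) + (t.map g).sum) % pvM :=
      Int.ModEq.add_right _ (Int.emod_emod_of_dvd _ dvd_rfl)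
    rw [this, add_assoc]

theorem foldl_pvmod_mul (g : Int → Int) (l : List Int) (a : Int) (ha : a % pvM = a) :
    l.foldl (fun x j => pvmod (x * g j)) a = (a * (l.map g).prod) % pvM := by
  induction l generalizing a with
  | nil => simp [ha]
  | cons h t ih =>
    simp only [List.foldl_cons, List.map_cons, List.prod_cons]
    rw [ih (pvmod (a * g h)) (by rw [pvmod_eq]; exact Int.emod_emod_of_dvd _ dvd_rfl), pvmod_eq]
    have : ((a * g h) % pvM * (t.map g).prod) % pvM = ((a * g h) * (t.map g).prod) % pvM :=
      Int.ModEq.mul_right _ (Int.emod_emod_of_dvd _ dvd_rfl)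
    rw [this, mul_assoc]

theorem foldl_pvmod_add_zero {α : Type} (g : α → Int) (l : List α) :
    l.foldl (fun x j => pvmod (x + g j)) 0 = (l.map g).sum % pvM := by
  rw [foldl_pvmod_add g l 0 (Int.zero_emod _), zero_add]

theorem filter_range_ne (ti m : Int) (h1 : 1 ≤ ti) (h2 : ti ≤ m) :
    (PySem.List.pyRange 1 (m + 1)).filter (fun j => decide ¬(j = ti))
      = PySem.List.pyRange 1 ti ++ PySem.List.pyRange (ti + 1) (m + 1) := by
  simp only [decide_not]
  rw [PySem.List.pyRange_one_append 1 ti (m + 1) h1 (by omega), List.filter_append,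
      PySem.List.pyRange_one_cons (show ti < m + 1 by omega), List.filter_cons]
  have e1 : (PySem.List.pyRange 1 ti).filter (fun j => !decide (j = ti)) = PySem.List.pyRange 1 ti := by
    apply List.filter_eq_self.mpr
    intro x hx
    have := PySem.List.mem_pyRange_one.mp hx
    simp; omega
  have e2 : (PySem.List.pyRange (ti + 1) (m + 1)).filter (fun j => !decide (j = ti)) = PySem.List.pyRange (ti + 1) (m + 1) := by
    apply List.filter_eq_self.mpr
    intro x hx
    have := PySem.List.mem_pyRange_one.mp hx
    simp; omega
  simp [e1, e2]

theorem prod_sub_desc (t : Int) (n : Nat) :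
    ((PySem.List.pyRange (t - n) t).map (fun j => t - j)).prod = (Nat.factorial n : Int) := by
  induction n with
  | zero => simp [PySem.List.pyRange_one_eq_nil (by omega : t ≤ t)]
  | succ n ih =>
    rw [PySem.List.pyRange_one_cons (by push_cast; omega)]
    have e : t - (n + 1 : Nat) + 1 = t - (n : Nat) := by push_cast; ring
    rw [List.map_cons, List.prod_cons, e, ih]
    push_cast [Nat.factorial_succ]
    ring

theorem prod_sub_asc (t : Int) (n : Nat) :
    ((PySem.List.pyRange (t + 1) (t + 1 + n)).map (fun j => t - j)).prod = (-1) ^ n * (Nat.factorial n : Int) := by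
  induction n with
  | zero =>
    rw [show t + 1 + ((0 : Nat) : Int) = t + 1 by push_cast; ring,
        PySem.List.pyRange_one_eq_nil le_rfl]
    simp [Nat.factorial]
  | succ n ih =>
    have e : t + 1 + ((n : Nat) + 1 : Nat) = (t + 1 + (n : Nat)) + 1 := by push_cast; ring
    rw [e, PySem.List.pyRange_one_succ_right (by omega), List.map_append, List.prod_append, ih]
    simp only [List.map_cons, List.map_nil, List.prod_cons, List.prod_nil]
    push_cast [Nat.factorial_succ, pow_succ]
    ring

theorem lagrange_eq (s : Int) (m i : Nat) (hi : i < m) :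
    pvLagrange (i : Int) (m : Int) s = vRef s m i := by
  unfold pvLagrange
  have pairfold : ∀ (l : List Int) (a b : Int),
      l.foldl (fun (p : Int × Int) j =>
        if j = (i : Int) + 1 then p
        else (pvmod (p.1 * (s - j)), pvmod (p.2 * ((i : Int) + 1 - j)))) (a, b)
      = (l.foldl (fun x j => if j = (i : Int) + 1 then x else pvmod (x * (s - j))) a,
         l.foldl (fun x j => if j = (i : Int) + 1 then x else pvmod (x * ((i : Int) + 1 - j))) b) := by
    intro l
    induction l with
    | nil => intro a b; rfl
    | cons h t ih =>
      intro a b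
      by_cases hh : h = (i : Int) + 1 <;> simp [hh, ih]
  simp only [pairfold]
  have hswap1 : (fun (x : Int) (j : Int) => if j = (i : Int) + 1 then x else pvmod (x * (s - j)))
      = (fun x j => if ¬(j = (i : Int) + 1) then pvmod (x * (s - j)) else x) := by
    funext x j; exact (ite_not _ _ _).symm
  have hswap2 : (fun (x : Int) (j : Int) => if j = (i : Int) + 1 then x else pvmod (x * ((i : Int) + 1 - j)))
      = (fun x j => if ¬(j = (i : Int) + 1) then pvmod (x * ((i : Int) + 1 - j)) else x) := by
    funext x j; exact (ite_not _ _ _).symm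
  rw [hswap1, hswap2, PySem.List.foldl_ite_eq_foldl_filter, PySem.List.foldl_ite_eq_foldl_filter,
      filter_range_ne ((i : Int) + 1) (m : Int) (by omega) (by exact_mod_cast hi),
      foldl_pvmod_mul _ _ 1 one_emod_pvM, foldl_pvmod_mul _ _ 1 one_emod_pvM]
  rw [List.map_append, List.prod_append, List.map_append, List.prod_append]
  have hd1 : ((PySem.List.pyRange 1 ((i : Int) + 1)).map (fun j => (i : Int) + 1 - j)).prod
      = (Nat.factorial i : Int) := by
    have h := prod_sub_desc ((i : Int) + 1) i
    rw [show ((i : Int) + 1) - (i : Nat) = 1 by ring] at h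
    exact h
  have hd2 : ((PySem.List.pyRange ((i : Int) + 1 + 1) ((m : Int) + 1)).map (fun j => (i : Int) + 1 - j)).prod
      = (-1) ^ (m - 1 - i) * (Nat.factorial (m - 1 - i) : Int) := by
    have h := prod_sub_asc ((i : Int) + 1) (m - 1 - i)
    rw [show ((i : Int) + 1) + 1 + ((m - 1 - i : Nat) : Int) = (m : Int) + 1 by omega] at h
    exact h
  rw [hd1, hd2, one_mul, one_mul]
  unfold vRef prodS
  rw [pvmod_eq]
  ring_nf

def pvScanF (f : Int → Int) : Nat → Int
  | 0 => 1
  | k + 1 => pvmod (pvScanF f k * f ((k : Int) + 1))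

theorem scan_fold (f : Int → Int) (n : Nat) :
    (PySem.List.pyRange 1 ((n : Int) + 1)).foldl
        (fun acc i => acc ++ [pvmod (PySem.List.pyGetD acc (i - 1) 0 * f i)]) [1]
      = (List.range (n + 1)).map (pvScanF f) := by
  induction n with
  | zero =>
    rw [PySem.List.pyRange_one_eq_nil (by norm_num)]
    rfl
  | succ n ih =>
    rw [show ((n + 1 : Nat) : Int) + 1 = ((n : Int) + 1) + 1 by push_cast; ring,
        PySem.List.pyRange_one_succ_right (by omega), List.foldl_append, ih]
    simp only [List.foldl_cons, List.foldl_nil]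
    rw [show ((n : Int) + 1) - 1 = ((n : Nat) : Int) by ring, PySem.List.pyGetD_natCast,
        PySem.List.getD_map_range _ _ _ _ (by omega)]
    rw [List.range_succ (n := n + 1), List.map_append]
    rfl

theorem scanF_modEq (f : Int → Int) (n : Nat) :
    pvScanF f n ≡ ((PySem.List.pyRange 1 ((n : Int) + 1)).map f).prod [ZMOD pvM] := by
  induction n with
  | zero =>
    rw [PySem.List.pyRange_one_eq_nil (by norm_num)]
    rfl
  | succ n ih =>
    rw [show ((n + 1 : Nat) : Int) + 1 = ((n : Int) + 1) + 1 by push_cast; ring,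
        PySem.List.pyRange_one_succ_right (by omega), List.map_append, List.prod_append]
    simp only [List.map_cons, List.map_nil, List.prod_cons, List.prod_nil, mul_one]
    show pvmod (pvScanF f n * f ((n : Int) + 1)) ≡ _ [ZMOD pvM]
    calc pvmod (pvScanF f n * f ((n : Int) + 1))
        ≡ pvScanF f n * f ((n : Int) + 1) [ZMOD pvM] := by
          rw [pvmod_eq]; exact Int.emod_emod_of_dvd _ dvd_rfl
      _ ≡ ((PySem.List.pyRange 1 ((n : Int) + 1)).map f).prod * f ((n : Int) + 1) [ZMOD pvM] :=
          ih.mul_right _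

theorem prod_id_range (n : Nat) :
    ((PySem.List.pyRange 1 ((n : Int) + 1)).map (fun t => t)).prod = (Nat.factorial n : Int) := by
  induction n with
  | zero =>
    rw [PySem.List.pyRange_one_eq_nil (by norm_num)]
    simp [Nat.factorial]
  | succ n ih =>
    rw [show ((n + 1 : Nat) : Int) + 1 = ((n : Int) + 1) + 1 by push_cast; ring,
        PySem.List.pyRange_one_succ_right (by omega), List.map_append, List.prod_append, ih]
    simp only [List.map_cons, List.map_nil, List.prod_cons, List.prod_nil, mul_one]
    push_cast [Nat.factorial_succ]
    ring

theorem suf_foldr (s : Int) (n : Nat) : ∀ (a : Int) (k : Nat), k ≤ n →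
    ((PySem.List.pyRange a (a + (n : Int))).foldr
        (fun t l => pvmod (PySem.List.pyGetD l 0 0 * (s - t)) :: l) [1]).getD k 0
      ≡ prodS s (a + k) (a + n) [ZMOD pvM] := by
  induction n with
  | zero =>
    intro a k hk
    interval_cases k
    rw [PySem.List.pyRange_one_eq_nil (by norm_num)]
    unfold prodS
    rw [PySem.List.pyRange_one_eq_nil (by omega)]
    rfl
  | succ n ih =>
    intro a k hk
    rw [PySem.List.pyRange_one_cons (by push_cast; omega), List.foldr_cons]
    have eb : a + ((n + 1 : Nat) : Int) = (a + 1) + (n : Int) := by push_cast; ring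
    rw [eb]
    match k with
    | 0 =>
      simp only [List.getD_cons_zero]
      have hh := ih (a + 1) 0 (by omega)
      rw [PySem.List.pyGetD_zero]
      calc pvmod (((PySem.List.pyRange (a + 1) (a + 1 + (n : Int))).foldr
              (fun t l => pvmod (PySem.List.pyGetD l 0 0 * (s - t)) :: l) [1]).getD 0 0 * (s - a))
          ≡ ((PySem.List.pyRange (a + 1) (a + 1 + (n : Int))).foldr
              (fun t l => pvmod (PySem.List.pyGetD l 0 0 * (s - t)) :: l) [1]).getD 0 0 * (s - a) [ZMOD pvM] := by
            rw [pvmod_eq]; exact Int.emod_emod_of_dvd _ dvd_rfl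
        _ ≡ prodS s (a + 1 + 0) (a + 1 + (n : Int)) * (s - a) [ZMOD pvM] := hh.mul_right _
        _ = prodS s (a + 0) (a + 1 + (n : Int)) := by
            unfold prodS
            rw [add_zero, add_zero, PySem.List.pyRange_one_cons (a := a) (by omega),
              List.map_cons, List.prod_cons]
            ring
    | k' + 1 =>
      simp only [List.getD_cons_succ]
      have hh := ih (a + 1) k' (by omega)
      rw [show a + ((k' + 1 : Nat) : Int) = (a + 1) + (k' : Int) by push_cast; ring]
      exact hh

theorem suf_char (s : Int) (m k : Nat) (hk : k ≤ m) :
    (pvSuf s (m : Int)).getD k 0 ≡ prodS s ((k : Int) + 1) ((m : Int) + 1) [ZMOD pvM] := by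
  unfold pvSuf
  rw [PySem.List.pyRange_neg_one_eq_reverse, List.foldl_reverse]
  have h := suf_foldr s m 1 k hk
  rw [show (1 : Int) + (m : Int) = (m : Int) + 1 by ring,
      show (1 : Int) + (k : Int) = (k : Int) + 1 by ring] at h
  exact h

theorem valsB_eq (s : Int) (m i : Nat) (hi : i < m) :
    PySem.List.pyGetD (pvValsB s (m : Int)) (i : Int) 0 = vRef s m i := by
  unfold pvValsB
  simp only [PySem.List.foldl_append_singleton_eq_map, List.nil_append]
  rw [PySem.List.pyGetD_map_pyRange_of_nonneg _ _ _ _ (by omega) (by exact_mod_cast hi)]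
  -- pre entry
  have hpre : PySem.List.pyGetD (pvPre s (m : Int)) (i : Int) 0
      ≡ prodS s 1 ((i : Int) + 1) [ZMOD pvM] := by
    unfold pvPre
    rw [scan_fold (fun j => s - j) m, PySem.List.pyGetD_natCast,
        PySem.List.getD_map_range _ _ _ _ (by omega)]
    exact scanF_modEq (fun j => s - j) i
  -- suf entry
  have hsuf : PySem.List.pyGetD (pvSuf s (m : Int)) ((i : Int) + 1) 0
      ≡ prodS s ((i : Int) + 2) ((m : Int) + 1) [ZMOD pvM] := by
    rw [show (i : Int) + 1 = ((i + 1 : Nat) : Int) by push_cast; ring, PySem.List.pyGetD_natCast]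
    have h := suf_char s m (i + 1) (by omega)
    rw [show ((i + 1 : Nat) : Int) + 1 = (i : Int) + 2 by push_cast; ring] at h
    exact h
  -- fact entries
  have hfa : PySem.List.pyGetD (pvFact (m : Int)) (i : Int) 0
      ≡ (Nat.factorial i : Int) [ZMOD pvM] := by
    unfold pvFact
    rw [scan_fold (fun t => t) m, PySem.List.pyGetD_natCast,
        PySem.List.getD_map_range _ _ _ _ (by omega)]
    exact (scanF_modEq (fun t => t) i).trans (by rw [prod_id_range])
  have hfb : PySem.List.pyGetD (pvFact (m : Int)) ((m : Int) - 1 - (i : Int)) 0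
      ≡ (Nat.factorial (m - 1 - i) : Int) [ZMOD pvM] := by
    rw [show (m : Int) - 1 - (i : Int) = ((m - 1 - i : Nat) : Int) by omega, PySem.List.pyGetD_natCast]
    unfold pvFact
    rw [scan_fold (fun t => t) m, PySem.List.getD_map_range _ _ _ _ (by omega)]
    exact (scanF_modEq (fun t => t) (m - 1 - i)).trans (by rw [prod_id_range])
  have hnum : pvmod (PySem.List.pyGetD (pvPre s (m : Int)) (i : Int) 0
        * PySem.List.pyGetD (pvSuf s (m : Int)) ((i : Int) + 1) 0)
      = (prodS s 1 ((i : Int) + 1) * prodS s ((i : Int) + 2) ((m : Int) + 1)) % pvM := by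
    rw [pvmod_eq]; exact hpre.mul hsuf
  have hden : (if PySem.Int.mod ((m : Int) - 1 - (i : Int)) 2 = 1
        then pvmod (-(pvmod (PySem.List.pyGetD (pvFact (m : Int)) (i : Int) 0
              * PySem.List.pyGetD (pvFact (m : Int)) ((m : Int) - 1 - (i : Int)) 0)))
        else pvmod (PySem.List.pyGetD (pvFact (m : Int)) (i : Int) 0
              * PySem.List.pyGetD (pvFact (m : Int)) ((m : Int) - 1 - (i : Int)) 0))
      = ((Nat.factorial i : Int) * ((-1) ^ (m - 1 - i) * (Nat.factorial (m - 1 - i) : Int))) % pvM := by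
    have hcast : (m : Int) - 1 - (i : Int) = ((m - 1 - i : Nat) : Int) := by omega
    have hmod2 : PySem.Int.mod ((m : Int) - 1 - (i : Int)) 2 = (((m - 1 - i) % 2 : Nat) : Int) := by
      rw [hcast]; exact_mod_cast PySem.Int.mod_natCast (m - 1 - i) 2
    by_cases hpar : (m - 1 - i) % 2 = 1
    · rw [if_pos (by rw [hmod2]; exact_mod_cast hpar)]
      rw [pvmod_eq, pvmod_eq]
      have : (-(PySem.List.pyGetD (pvFact (m : Int)) (i : Int) 0
            * PySem.List.pyGetD (pvFact (m : Int)) ((m : Int) - 1 - (i : Int)) 0 % pvM))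
          ≡ -((Nat.factorial i : Int) * (Nat.factorial (m - 1 - i) : Int)) [ZMOD pvM] := by
        have h1 : PySem.List.pyGetD (pvFact (m : Int)) (i : Int) 0
              * PySem.List.pyGetD (pvFact (m : Int)) ((m : Int) - 1 - (i : Int)) 0 % pvM
            ≡ (Nat.factorial i : Int) * (Nat.factorial (m - 1 - i) : Int) [ZMOD pvM] :=
          Int.ModEq.trans (Int.emod_emod_of_dvd _ dvd_rfl) (hfa.mul hfb)
        exact h1.neg
      rw [this]
      congr 1
      rw [(Nat.odd_iff.mpr hpar).neg_one_pow]
      ring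
    · rw [if_neg (by rw [hmod2]; intro hc; exact hpar (by exact_mod_cast hc))]
      rw [pvmod_eq, hfa.mul hfb]
      congr 1
      rw [(Nat.even_iff.mpr (by omega)).neg_one_pow]
      ring
  rw [hnum, hden, pvmod_eq]
  unfold vRef
  ring_nf

theorem mul_emod_right' (a b : Int) : (a * (b % pvM)) % pvM = (a * b) % pvM := by
  rw [Int.mul_emod, Int.emod_emod_of_dvd _ dvd_rfl, ← Int.mul_emod]

theorem sum_strip (s : Finset Nat) (a b : Nat → Int) :
    (∑ x ∈ s, a x * (b x % pvM)) % pvM = (∑ x ∈ s, a x * b x) % pvM := by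
  rw [Finset.sum_int_mod]
  conv_rhs => rw [Finset.sum_int_mod]
  congr 1
  exact Finset.sum_congr rfl (fun x _ => mul_emod_right' _ _)

theorem sum_pyRange (f : Int → Int) (n : Nat) :
    ((PySem.List.pyRange 0 (n : Int)).map f).sum = ∑ i ∈ Finset.range n, f (i : Int) := by
  rw [PySem.List.pyRange_zero_nat, List.map_map]; rfl

theorem key_swap (m nvars : Nat) (w : Nat → Int) (c : Nat → Nat → Int) (v : Nat → Int) :
    (∑ k ∈ Finset.range nvars, w k * ((∑ i ∈ Finset.range m, c i k * v i) % pvM)) % pvM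
      = (∑ i ∈ Finset.range m, v i * ((∑ k ∈ Finset.range nvars, c i k * w k) % pvM)) % pvM := by
  rw [sum_strip, sum_strip]
  congr 1
  simp only [Finset.mul_sum]
  rw [Finset.sum_comm]
  exact Finset.sum_congr rfl (fun i _ => Finset.sum_congr rfl (fun k _ => by ring))

theorem component (M : List (List Int)) (witness : List (Option Int)) (s : Int) (m nvars : Nat) :
    pvBuildPoly M witness s (m : Int) (nvars : Int)
      = pvAccRows M witness (pvValsB s (m : Int)) (m : Int) (nvars : Int) := by
  unfold pvBuildPoly pvAccRows
  simp only [foldl_pvmod_add_zero, sum_pyRange]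
  have hL : (∑ k ∈ Finset.range nvars, (PySem.List.pyGetD witness (k : Int) none).getD 0 *
        PySem.List.pyGetD ((PySem.List.pyRange 0 (nvars : Int)).map (fun k' =>
          (∑ i ∈ Finset.range m, PySem.List.pyGetD (PySem.List.pyGetD M (i : Int) []) k' 0 *
            PySem.List.pyGetD ((PySem.List.pyRange 0 (m : Int)).map (fun i' => pvLagrange i' (m : Int) s)) (i : Int) 0) % pvM)) (k : Int) 0)
      = ∑ k ∈ Finset.range nvars, (PySem.List.pyGetD witness (k : Int) none).getD 0 *
          ((∑ i ∈ Finset.range m, PySem.List.pyGetD (PySem.List.pyGetD M (i : Int) []) (k : Int) 0 * vRef s m i) % pvM) := by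
    refine Finset.sum_congr rfl (fun k hk => ?_)
    rw [PySem.List.pyGetD_map_pyRange_of_nonneg _ _ _ _ (by omega)
        (by exact_mod_cast Finset.mem_range.mp hk)]
    congr 2
    refine Finset.sum_congr rfl (fun i hi => ?_)
    rw [PySem.List.pyGetD_map_pyRange_of_nonneg _ _ _ _ (by omega)
        (by exact_mod_cast Finset.mem_range.mp hi),
        lagrange_eq s m i (Finset.mem_range.mp hi)]
  have hR : (∑ i ∈ Finset.range m, PySem.List.pyGetD (pvValsB s (m : Int)) (i : Int) 0 *
        ((∑ k ∈ Finset.range nvars, PySem.List.pyGetD (PySem.List.pyGetD M (i : Int) []) (k : Int) 0 *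
          (PySem.List.pyGetD witness (k : Int) none).getD 0) % pvM))
      = ∑ i ∈ Finset.range m, vRef s m i *
          ((∑ k ∈ Finset.range nvars, PySem.List.pyGetD (PySem.List.pyGetD M (i : Int) []) (k : Int) 0 *
            (PySem.List.pyGetD witness (k : Int) none).getD 0) % pvM) := by
    refine Finset.sum_congr rfl (fun i hi => ?_)
    rw [valsB_eq s m i (Finset.mem_range.mp hi)]
  rw [hL, hR]
  exact key_swap m nvars (fun k => (PySem.List.pyGetD witness (k : Int) none).getD 0)
    (fun i k => PySem.List.pyGetD (PySem.List.pyGetD M (i : Int) []) (k : Int) 0)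
    (vRef s m)

-- ===== VERDICT (by name: the statement is the Claim_ definition above) =====
theorem eval_qap_at_s_spec : Claim_equal_eval_qap_at_s := by
  intro A B C witness s_val _ _
  unfold Spec_eval_qap_at_s eval_qap_at_s eval_qap_at_s_alt
  have h := fun M => component M witness s_val A.length (PySem.List.pyGetD A 0 []).length
  simp only at h ⊢
  exact Prod.ext (h A) (Prod.ext (h B) (h C))
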